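-- pv_equiv track=rewrite | github.com/nitin22032002/leetcode_question | Make Matrix Beautiful - GFG/make-matrix-beautiful.py | findMinOpeartion
-- ===== SOURCE A (Python) =====
-- def findMinOpeartion(matrix, n):
--     row=[0 for _ in range(n)]
--     col=[0 for _ in range(n)]
--     for i in range(n):
--         for j in range(n):
--             row[i]+=matrix[i][j]
--             col[j]+=matrix[i][j]
--     target=max(row+col)
--     ans=0
--     for i in range(n):
--         for j in range(n):
--             r=max(row[i],col[j])
--             if(r<target):
--                 x=(target-r)
--                 ans+=x
--                 row[i]+=x
--                 col[j]+=x
--     return ans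
-- ===== SOURCE B (Python) =====
-- def findMinOpeartion(matrix, n):
--     row = [sum(matrix[i][j] for j in range(n)) for i in range(n)]
--     col = [sum(matrix[i][j] for i in range(n)) for j in range(n)]
--     target = max(row + col)
--     return n * target - sum(row)
-- ===== Notes on version B (the rewrite author's own statement) =====
-- stated objective: simpler
-- what changed: The whole second nested greedy loop (per-cell padding with mutable row/col state) is replaced by the closed form n*target - total, since padding every line up to target adds exactly n*target minus the matrix total.
import Mathlib
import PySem

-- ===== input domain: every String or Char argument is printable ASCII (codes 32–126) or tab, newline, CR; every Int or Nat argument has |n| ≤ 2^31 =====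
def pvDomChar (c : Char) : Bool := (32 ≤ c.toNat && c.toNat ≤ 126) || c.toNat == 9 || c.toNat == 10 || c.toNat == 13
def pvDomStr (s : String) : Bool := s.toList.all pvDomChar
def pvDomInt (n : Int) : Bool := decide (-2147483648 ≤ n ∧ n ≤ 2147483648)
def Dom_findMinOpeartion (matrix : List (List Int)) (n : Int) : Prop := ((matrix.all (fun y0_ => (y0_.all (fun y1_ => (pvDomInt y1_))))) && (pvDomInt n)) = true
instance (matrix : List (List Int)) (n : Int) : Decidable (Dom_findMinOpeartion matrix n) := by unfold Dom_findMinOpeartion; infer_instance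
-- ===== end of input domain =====

-- B replaces A's second nested greedy loop by the closed form n*target - total; return value only.

-- ===== PORT A =====
def findMinOpeartion (matrix : List (List Int)) (n : Int) : Int :=
  let row : List Int := (PySem.List.pyRange 0 n 1).map (fun _ => (0 : Int))
  let col : List Int := (PySem.List.pyRange 0 n 1).map (fun _ => (0 : Int))
  let rc : List Int × List Int := (PySem.List.pyRange 0 n 1).foldl (fun rc i =>
      (PySem.List.pyRange 0 n 1).foldl (fun rc j =>
        (PySem.List.pySetD rc.1 i (PySem.List.pyGetD rc.1 i 0 + PySem.List.pyGetD (PySem.List.pyGetD matrix i []) j 0),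
         PySem.List.pySetD rc.2 j (PySem.List.pyGetD rc.2 j 0 + PySem.List.pyGetD (PySem.List.pyGetD matrix i []) j 0))) rc)
      (row, col)
  let target : Int := (PySem.List.max? (rc.1 ++ rc.2) (fun x => x)).getD 0
  let st : List Int × List Int × Int := (PySem.List.pyRange 0 n 1).foldl (fun st i =>
      (PySem.List.pyRange 0 n 1).foldl (fun st j =>
        if max (PySem.List.pyGetD st.1 i 0) (PySem.List.pyGetD st.2.1 j 0) < target then
          (PySem.List.pySetD st.1 i (PySem.List.pyGetD st.1 i 0 + (target - max (PySem.List.pyGetD st.1 i 0) (PySem.List.pyGetD st.2.1 j 0))),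
           PySem.List.pySetD st.2.1 j (PySem.List.pyGetD st.2.1 j 0 + (target - max (PySem.List.pyGetD st.1 i 0) (PySem.List.pyGetD st.2.1 j 0))),
           st.2.2 + (target - max (PySem.List.pyGetD st.1 i 0) (PySem.List.pyGetD st.2.1 j 0)))
        else st) st)
      (rc.1, rc.2, (0 : Int))
  st.2.2

-- ===== PORT B =====
def findMinOpeartion_alt (matrix : List (List Int)) (n : Int) : Int :=
  let row : List Int := (PySem.List.pyRange 0 n 1).map (fun i =>
      ((PySem.List.pyRange 0 n 1).map (fun j => PySem.List.pyGetD (PySem.List.pyGetD matrix i []) j 0)).sum)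
  let col : List Int := (PySem.List.pyRange 0 n 1).map (fun j =>
      ((PySem.List.pyRange 0 n 1).map (fun i => PySem.List.pyGetD (PySem.List.pyGetD matrix i []) j 0)).sum)
  let target : Int := (PySem.List.max? (row ++ col) (fun x => x)).getD 0
  n * target - row.sum

-- ===== PRECONDITION & SPEC =====
-- Pre_ excludes exactly the inputs where A raises: n < 1 (max([]) is a ValueError) and
-- matrices whose first n rows are missing or shorter than n (IndexError).
def Pre_findMinOpeartion (matrix : List (List Int)) (n : Int) : Prop :=
  1 ≤ n ∧ n ≤ (matrix.length : Int) ∧ ∀ r ∈ matrix.take n.toNat, n ≤ (r.length : Int)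
instance (matrix : List (List Int)) (n : Int) : Decidable (Pre_findMinOpeartion matrix n) := by
  unfold Pre_findMinOpeartion; infer_instance

def pvWitness_findMinOpeartion : List (List Int) × Int := ([[1, 2], [3, 4]], 2)

def Spec_findMinOpeartion (matrix : List (List Int)) (n : Int) (out : Int) : Prop := out = findMinOpeartion_alt matrix n
instance (matrix : List (List Int)) (n : Int) (out : Int) : Decidable (Spec_findMinOpeartion matrix n out) := by unfold Spec_findMinOpeartion; infer_instance

-- ===== CLAIM (what is proved, stated in full; the proofs are below) =====
def Claim_equal_findMinOpeartion : Prop := ∀ (matrix : List (List Int)) (n : Int), Dom_findMinOpeartion matrix n → Pre_findMinOpeartion matrix n → Spec_findMinOpeartion matrix n (findMinOpeartion matrix n)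

-- ===== LEMMAS AND PROOFS =====

lemma foldl_set_single (l : List Nat) (i : Nat) (w : Nat → Int) :
    ∀ r : List Int, l.foldl (fun r j => r.set i (r.getD i 0 + w j)) r
      = r.set i (r.getD i 0 + (l.map w).sum) := by
  induction l with
  | nil =>
    intro r
    simp only [List.foldl_nil, List.map_nil, List.sum_nil, add_zero]
    by_cases h : i < r.length
    · rw [List.getD_eq_getElem r 0 h, List.set_getElem_self]
    · rw [List.set_eq_of_length_le (by omega)]
  | cons a l ih =>
    intro r
    simp only [List.foldl_cons, List.map_cons, List.sum_cons]
    rw [ih]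
    by_cases h : i < r.length
    · have hg : (r.set i (r.getD i 0 + w a)).getD i 0 = r.getD i 0 + w a := by
        rw [List.getD_eq_getElem _ 0 (by simpa using h), List.getElem_set_self (by simpa using h)]
      rw [hg, List.set_set]
      ring_nf
    · rw [List.set_eq_of_length_le (by simp; omega), List.set_eq_of_length_le (by omega),
        List.set_eq_of_length_le (by omega)]

lemma map_getD_range (c : List Int) : (List.range c.length).map (fun j => c.getD j 0) = c := by
  apply List.ext_getElem (by simp)
  intro i h1 h2
  simp only [List.getElem_map, List.getElem_range, List.getD_eq_getElem c 0 (by simpa using h2)]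

lemma foldl_set_pointwise (m : Nat) (w : Nat → Int) :
    ∀ c : List Int, m ≤ c.length →
      (List.range m).foldl (fun c j => c.set j (c.getD j 0 + w j)) c
        = (List.range m).map (fun j => c.getD j 0 + w j) ++ c.drop m := by
  induction m with
  | zero => intro c _; simp
  | succ m ih =>
    intro c hc
    rw [List.range_succ, List.foldl_append, List.foldl_cons, List.foldl_nil, ih c (by omega)]
    have hlen : ((List.range m).map (fun j => c.getD j 0 + w j)).length = m := by simp
    have hm : m < c.length := by omega
    rw [List.drop_eq_getElem_cons hm]
    rw [List.getD_append_right _ _ _ _ (by omega), List.set_append_right _ _ (by omega)]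
    simp only [hlen, Nat.sub_self, List.getD_cons_zero, List.set_cons_zero]
    rw [List.map_append]
    simp [List.getElem?_eq_getElem hm]

def innerGo (t s : Int) : List Int → Int × List Int
  | [] => (s, [])
  | c :: cs =>
    if max s c < t then
      let p := innerGo t (s + (t - max s c)) cs
      (p.1, (c + (t - max s c)) :: p.2)
    else
      let p := innerGo t s cs
      (p.1, c :: p.2)

lemma innerGo_length (t s : Int) (cs : List Int) : (innerGo t s cs).2.length = cs.length := by
  induction cs generalizing s with
  | nil => rfl
  | cons c cs ih => simp only [innerGo]; split <;> simp [ih]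

lemma sum_map_sub (t : Int) (l : List Int) :
    (l.map (fun s => t - s)).sum = l.length * t - l.sum := by
  induction l with
  | nil => simp
  | cons a l ih => simp [ih]; ring

lemma innerGo_spec (t : Int) :
    ∀ (cs : List Int) (s : Int), s ≤ t → (∀ c ∈ cs, c ≤ t) →
      t - s ≤ (cs.map (fun c => t - c)).sum →
      (innerGo t s cs).1 = t ∧ (∀ c ∈ (innerGo t s cs).2, c ≤ t) ∧
        (innerGo t s cs).2.sum = cs.sum + (t - s) := by
  intro cs
  induction cs with
  | nil =>
    intro s hs _ hdef
    simp only [innerGo, List.map_nil, List.sum_nil] at *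
    refine ⟨by omega, by simp, by simp; omega⟩
  | cons c cs ih =>
    intro s hs hle hdef
    have hct : c ≤ t := hle c (List.mem_cons_self ..)
    have hcs : ∀ x ∈ cs, x ≤ t := fun x hx => hle x (List.mem_cons_of_mem _ hx)
    have hnn : 0 ≤ (cs.map (fun c => t - c)).sum :=
      List.sum_nonneg (fun x hx => by obtain ⟨y, hy, rfl⟩ := List.mem_map.1 hx; have := hcs y hy; omega)
    simp only [List.map_cons, List.sum_cons] at hdef
    simp only [innerGo]
    split
    · rename_i hlt
      have hs' : s + (t - max s c) ≤ t := by omega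
      have hdef' : t - (s + (t - max s c)) ≤ (cs.map (fun c => t - c)).sum := by
        rcases max_choice s c with h | h <;> rw [h] at hlt ⊢ <;> omega
      obtain ⟨h1, h2, h3⟩ := ih _ hs' hcs hdef'
      refine ⟨h1, ?_, ?_⟩
      · intro x hx
        simp only [List.mem_cons] at hx
        rcases hx with rfl | hx
        · rcases max_choice s c with h | h <;> rw [h] <;> omega
        · exact h2 x hx
      · simp only [List.sum_cons, h3]
        ring
    · rename_i hge
      have hmax : max s c = t := by omega
      have : s = t ∨ c = t := by rcases max_choice s c with h | h <;> omega
      have hdef' : t - s ≤ (cs.map (fun c => t - c)).sum := by omega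
      obtain ⟨h1, h2, h3⟩ := ih _ hs hcs hdef'
      refine ⟨h1, ?_, by simp [h3]; ring⟩
      intro x hx
      simp only [List.mem_cons] at hx
      rcases hx with rfl | hx
      · exact hct
      · exact h2 x hx

def phase2Go (t : Int) : List Int → List Int → Int → List Int × List Int × Int
  | [], col, ans => ([], col, ans)
  | s :: rs, col, ans =>
    let p := innerGo t s col
    let q := phase2Go t rs p.2 (ans + (p.1 - s))
    (p.1 :: q.1, q.2.1, q.2.2)

lemma phase2Go_ans (t : Int) :
    ∀ (rs col : List Int) (ans : Int), (∀ s ∈ rs, s ≤ t) → (∀ c ∈ col, c ≤ t) →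
      (rs.map (fun s => t - s)).sum ≤ (col.map (fun c => t - c)).sum →
      (phase2Go t rs col ans).2.2 = ans + (rs.map (fun s => t - s)).sum := by
  intro rs
  induction rs with
  | nil => intro col ans _ _ _; simp [phase2Go]
  | cons s rs ih =>
    intro col ans hrs hcol H
    have hst : s ≤ t := hrs s (List.mem_cons_self ..)
    have hrs' : ∀ x ∈ rs, x ≤ t := fun x hx => hrs x (List.mem_cons_of_mem _ hx)
    have hnn : 0 ≤ (rs.map (fun s => t - s)).sum :=
      List.sum_nonneg (fun x hx => by obtain ⟨y, hy, rfl⟩ := List.mem_map.1 hx; have := hrs' y hy; omega)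
    simp only [List.map_cons, List.sum_cons] at H
    have hdef : t - s ≤ (col.map (fun c => t - c)).sum := by omega
    obtain ⟨h1, h2, h3⟩ := innerGo_spec t col s hst hcol hdef
    have hlen := innerGo_length t s col
    have hsum' : ((innerGo t s col).2.map (fun c => t - c)).sum
        = (col.map (fun c => t - c)).sum - (t - s) := by
      rw [sum_map_sub, sum_map_sub, hlen, h3]; ring
    simp only [phase2Go]
    rw [ih _ _ hrs' h2 (by omega)]
    simp only [List.map_cons, List.sum_cons]
    ring_nf
    omega

lemma inner_bridge (t : Int) (i : Nat) :
    ∀ (cs pre row : List Int) (ans : Int), i < row.length →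
      (List.range' pre.length cs.length).foldl
        (fun st j =>
          if max (st.1.getD i 0) (st.2.1.getD j 0) < t then
            (st.1.set i (st.1.getD i 0 + (t - max (st.1.getD i 0) (st.2.1.getD j 0))),
             st.2.1.set j (st.2.1.getD j 0 + (t - max (st.1.getD i 0) (st.2.1.getD j 0))),
             st.2.2 + (t - max (st.1.getD i 0) (st.2.1.getD j 0)))
          else st)
        (row, pre ++ cs, ans)
      = (row.set i (innerGo t (row.getD i 0) cs).1,
         pre ++ (innerGo t (row.getD i 0) cs).2,
         ans + ((innerGo t (row.getD i 0) cs).1 - row.getD i 0)) := by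
  intro cs
  induction cs with
  | nil =>
    intro pre row ans hi
    simp only [List.length_nil, List.range'_zero, List.foldl_nil, innerGo]
    rw [List.getD_eq_getElem row 0 hi, List.set_getElem_self]
    simp
  | cons c cs ih =>
    intro pre row ans hi
    have hs : row.getD i 0 = row[i] := List.getD_eq_getElem row 0 hi
    have hgc : (pre ++ c :: cs).getD pre.length 0 = c := by
      rw [List.getD_append_right _ _ _ _ (le_refl _)]
      simp
    simp only [List.length_cons, List.range'_succ, List.foldl_cons]
    simp only [hgc]
    by_cases hlt : max (row.getD i 0) c < t
    · rw [if_pos hlt]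
      have hset : (pre ++ c :: cs).set pre.length (c + (t - max (row.getD i 0) c))
          = (pre ++ [c + (t - max (row.getD i 0) c)]) ++ cs := by
        rw [List.set_append_right _ _ (le_refl _)]
        simp
      have hlen' : pre.length + 1 = (pre ++ [c + (t - max (row.getD i 0) c)]).length := by simp
      rw [hset, hlen', ih _ _ _ (by simpa using hi)]
      have hg' : (row.set i (row.getD i 0 + (t - max (row.getD i 0) c))).getD i 0
          = row.getD i 0 + (t - max (row.getD i 0) c) := by
        rw [List.getD_eq_getElem _ 0 (by simpa using hi), List.getElem_set_self (by simpa using hi)]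
      rw [hg', List.set_set]
      simp only [innerGo, if_pos hlt, Prod.mk.injEq]
      refine ⟨trivial, by simp, by ring⟩
    · rw [if_neg hlt]
      have hlen' : pre.length + 1 = (pre ++ [c]).length := by simp
      have hcol : pre ++ c :: cs = (pre ++ [c]) ++ cs := by simp
      rw [hcol, hlen', ih _ _ _ hi]
      simp only [innerGo, if_neg hlt]
      simp

lemma outer_bridge (t : Int) (m : Nat) :
    ∀ (rs pre col : List Int) (ans : Int), col.length = m →
      (List.range' pre.length rs.length).foldl
        (fun st i =>
          (List.range m).foldl
            (fun st j =>
              if max (st.1.getD i 0) (st.2.1.getD j 0) < t then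
                (st.1.set i (st.1.getD i 0 + (t - max (st.1.getD i 0) (st.2.1.getD j 0))),
                 st.2.1.set j (st.2.1.getD j 0 + (t - max (st.1.getD i 0) (st.2.1.getD j 0))),
                 st.2.2 + (t - max (st.1.getD i 0) (st.2.1.getD j 0)))
              else st) st)
        (pre ++ rs, col, ans)
      = (pre ++ (phase2Go t rs col ans).1, (phase2Go t rs col ans).2.1, (phase2Go t rs col ans).2.2) := by
  intro rs
  induction rs with
  | nil => intro pre col ans _; simp [phase2Go]
  | cons s rs ih =>
    intro pre col ans hcol
    simp only [List.length_cons, List.range'_succ, List.foldl_cons]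
    have hi : pre.length < (pre ++ s :: rs).length := by simp
    have hstep := inner_bridge t pre.length col [] (pre ++ s :: rs) ans hi
    simp only [List.length_nil, List.nil_append] at hstep
    rw [← hcol, List.range_eq_range']
    rw [hstep]
    have hgs : (pre ++ s :: rs).getD pre.length 0 = s := by
      rw [List.getD_append_right _ _ _ _ (le_refl _)]; simp
    rw [hgs]
    have hset : (pre ++ s :: rs).set pre.length (innerGo t s col).1
        = (pre ++ [(innerGo t s col).1]) ++ rs := by
      rw [List.set_append_right _ _ (le_refl _)]; simp
    rw [hset]
    have hlen' : pre.length + 1 = (pre ++ [(innerGo t s col).1]).length := by simp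
    have hclen : (innerGo t s col).2.length = col.length := innerGo_length t s col
    rw [hlen']
    have := ih (pre ++ [(innerGo t s col).1]) (innerGo t s col).2 (ans + ((innerGo t s col).1 - s)) (hclen.trans hcol)
    rw [← hcol, List.range_eq_range'] at this
    rw [this]
    simp only [phase2Go]
    simp

lemma list_sum_eq_finset (m : Nat) (f : Nat → Int) :
    ((List.range m).map f).sum = ∑ i ∈ Finset.range m, f i := rfl

lemma sum_sum_comm (m : Nat) (w : Nat → Nat → Int) :
    ((List.range m).map (fun i => ((List.range m).map (fun j => w i j)).sum)).sum
      = ((List.range m).map (fun j => ((List.range m).map (fun i => w i j)).sum)).sum := by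
  simp only [list_sum_eq_finset]
  exact Finset.sum_comm

lemma foldl_cols (m : Nat) (v : Nat → Nat → Int) (l : List Nat) :
    ∀ c : List Int, c.length = m →
      l.foldl (fun c i => (List.range m).foldl (fun c j => c.set j (c.getD j 0 + v i j)) c) c
        = (List.range m).map (fun j => c.getD j 0 + (l.map (fun i => v i j)).sum) := by
  induction l with
  | nil =>
    intro c hc
    simp only [List.foldl_nil, List.map_nil, List.sum_nil, add_zero]
    rw [← hc, map_getD_range]
  | cons a l ih =>
    intro c hc
    simp only [List.foldl_cons]
    rw [foldl_set_pointwise m (v a) c (by omega)]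
    have hdrop : c.drop m = [] := by rw [← hc]; simp
    rw [hdrop, List.append_nil]
    rw [ih _ (by simp)]
    apply List.map_congr_left
    intro j hj
    have hjm : j < m := List.mem_range.1 hj
    have hg : ((List.range m).map (fun j => c.getD j 0 + v a j)).getD j 0
        = c.getD j 0 + v a j := by
      rw [List.getD_eq_getElem _ 0 (by simpa using hjm)]
      simp
    rw [hg]
    simp only [List.map_cons, List.sum_cons]
    ring

-- Phase 1 as a pair of independent folds.
lemma phase1 (m : Nat) (w : Nat → Nat → Int) (l : List Nat) :
    ∀ (r c : List Int),
      l.foldl (fun rc i => (List.range m).foldl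
          (fun rc j => (rc.1.set i (rc.1.getD i 0 + w i j), rc.2.set j (rc.2.getD j 0 + w i j))) rc) (r, c)
      = (l.foldl (fun r i => r.set i (r.getD i 0 + ((List.range m).map (w i)).sum)) r,
         l.foldl (fun c i => (List.range m).foldl (fun c j => c.set j (c.getD j 0 + w i j)) c) c) := by
  induction l with
  | nil => intro r c; rfl
  | cons a l ih =>
    intro r c
    simp only [List.foldl_cons]
    have hsplit := PySem.List.foldl_prod_mk
      (fun (x : List Int) (j : Nat) => x.set a (x.getD a 0 + w a j))
      (fun (y : List Int) (j : Nat) => y.set j (y.getD j 0 + w a j))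
      (List.range m) r c
    rw [hsplit, ih, foldl_set_single]

-- ===== VERDICT (by name: the statement is the Claim_ definition above) =====
theorem findMinOpeartion_spec : Claim_equal_findMinOpeartion := by
  intro matrix n _ hpre
  obtain ⟨h1, h2, h3⟩ := hpre
  obtain ⟨m, rfl⟩ : ∃ m : Nat, n = (m : Int) := ⟨n.toNat, by omega⟩
  unfold Spec_findMinOpeartion findMinOpeartion findMinOpeartion_alt
  simp only [PySem.List.pyRange_zero_natCast, List.foldl_map, List.map_map, Function.comp_def,
    PySem.List.pySetD_natCast, PySem.List.pyGetD_natCast]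
  have hm1 : 1 ≤ m := by exact_mod_cast h1
  have hp1 := phase1 m (fun i j => (matrix.getD i []).getD j 0) (List.range m)
    (List.map (fun _ => (0 : Int)) (List.range m)) (List.map (fun _ => (0 : Int)) (List.range m))
  rw [hp1]
  have hzlen : (List.map (fun _ => (0 : Int)) (List.range m)).length = m := by simp
  have hz : ∀ i, i < m → (List.map (fun _ => (0 : Int)) (List.range m)).getD i 0 = 0 := by
    intro i hi
    rw [List.getD_eq_getElem _ 0 (by simpa using hi)]
    simp
  have hrow : (List.range m).foldl
      (fun r i => r.set i (r.getD i 0 + ((List.range m).map (fun j => (matrix.getD i []).getD j 0)).sum))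
      (List.map (fun _ => (0 : Int)) (List.range m))
      = (List.range m).map (fun i => ((List.range m).map (fun j => (matrix.getD i []).getD j 0)).sum) := by
    rw [foldl_set_pointwise _ _ _ (by omega)]
    rw [show (List.map (fun _ => (0 : Int)) (List.range m)).drop m = [] from by simp, List.append_nil]
    apply List.map_congr_left
    intro i hi
    rw [hz i (List.mem_range.1 hi), zero_add]
  have hcol : (List.range m).foldl
      (fun c i => (List.range m).foldl (fun c j => c.set j (c.getD j 0 + (matrix.getD i []).getD j 0)) c)
      (List.map (fun _ => (0 : Int)) (List.range m))
      = (List.range m).map (fun j => ((List.range m).map (fun i => (matrix.getD i []).getD j 0)).sum) := by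
    rw [foldl_cols m (fun i j => (matrix.getD i []).getD j 0) (List.range m) _ hzlen]
    apply List.map_congr_left
    intro j hj
    rw [hz j (List.mem_range.1 hj), zero_add]
  rw [hrow, hcol]
  set rowS := (List.range m).map (fun i => ((List.range m).map (fun j => (matrix.getD i []).getD j 0)).sum) with hrowS
  set colT := (List.range m).map (fun j => ((List.range m).map (fun i => (matrix.getD i []).getD j 0)).sum) with hcolT
  have hrowSlen : rowS.length = m := by simp [hrowS]
  have hcolTlen : colT.length = m := by simp [hcolT]
  have hsum : rowS.sum = colT.sum := sum_sum_comm m _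
  set t := (PySem.List.max? (rowS ++ colT) (fun x => x)).getD 0 with ht
  cases hmx : PySem.List.max? (rowS ++ colT) (fun x => x) with
  | none =>
    exfalso
    have := (PySem.List.max?_eq_none_iff (rowS ++ colT) (fun x => x)).1 hmx
    have : (rowS ++ colT).length = 0 := by rw [this]; rfl
    simp [hrowSlen, hcolTlen] at this
    omega
  | some mx =>
    have htmx : t = mx := by rw [ht, hmx]; rfl
    have hbr : ∀ s ∈ rowS, s ≤ t := by
      intro s hs
      rw [htmx]
      exact PySem.List.max?_isMax hmx s (List.mem_append_left _ hs)
    have hbc : ∀ c ∈ colT, c ≤ t := by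
      intro c hc
      rw [htmx]
      exact PySem.List.max?_isMax hmx c (List.mem_append_right _ hc)
    have hH : (rowS.map (fun s => t - s)).sum ≤ (colT.map (fun c => t - c)).sum := by
      rw [sum_map_sub, sum_map_sub, hrowSlen, hcolTlen, hsum]
    have hb := outer_bridge t m rowS [] colT 0 hcolTlen
    simp only [List.length_nil, List.nil_append] at hb
    rw [hrowSlen, ← List.range_eq_range'] at hb
    rw [hb, phase2Go_ans t rowS colT 0 hbr hbc hH, sum_map_sub, hrowSlen]
    ring
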